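-- pv_equiv track=rewrite | github.com/SanazSaadatifar/-Introduction-to-Programming-with-Python-course-projects | hw3-cycles-SanazSaadatifar/hw3_cycles.py | hasInvalidEntry
-- ===== SOURCE A (Python) =====
-- def hasInvalidEntry(path):
--
--     if len(path)==0 :
--         return True
--     else:
--         for m in path:
--             if m<0 or m>=len(path):
--                 return True
--         return False
-- ===== SOURCE B (Python) =====
-- def hasInvalidEntry(path):
--     if len(path) == 0:
--         return True
--     return min(path) < 0 or max(path) >= len(path)
-- ===== Notes on version B (the rewrite author's own statement) =====
-- stated objective: idiomatic
-- what changed: Replaces the per-element short-circuiting loop by an aggregate test: compare min(path) and max(path) against the bounds.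
import Mathlib
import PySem

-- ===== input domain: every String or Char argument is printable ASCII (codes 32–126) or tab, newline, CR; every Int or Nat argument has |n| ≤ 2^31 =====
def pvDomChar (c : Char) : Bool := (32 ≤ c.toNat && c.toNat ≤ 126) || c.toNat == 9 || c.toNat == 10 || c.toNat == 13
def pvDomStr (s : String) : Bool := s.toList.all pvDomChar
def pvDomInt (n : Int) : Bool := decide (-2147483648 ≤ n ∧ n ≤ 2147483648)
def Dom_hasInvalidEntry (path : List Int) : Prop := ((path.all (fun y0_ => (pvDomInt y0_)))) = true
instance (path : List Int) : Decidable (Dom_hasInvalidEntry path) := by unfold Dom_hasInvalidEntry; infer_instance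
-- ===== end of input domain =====

-- B replaces A's short-circuiting per-element scan by an aggregate min/max bounds check (idiomatic; same O(n) cost).

-- ===== PORT A =====
-- A's for-loop with early return: scan the list, len(path) is fixed throughout.
def hasInvalidEntryGo (n : Int) : List Int → Bool
  | [] => false
  | m :: rest => if m < 0 || n ≤ m then true else hasInvalidEntryGo n rest

def hasInvalidEntry (path : List Int) : Bool :=
  if path.length = 0 then true
  else hasInvalidEntryGo (path.length : Int) path

-- ===== PORT B =====
-- Source B: if empty return True; else min(path) < 0 or max(path) >= len(path).
def hasInvalidEntry_alt (path : List Int) : Bool :=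
  if path.length = 0 then true
  else
    match PySem.List.min? path (fun x => x), PySem.List.max? path (fun x => x) with
    | some mn, some mx => decide (mn < 0) || decide ((path.length : Int) ≤ mx)
    | _, _ => true

-- ===== PRECONDITION & SPEC =====
def Spec_hasInvalidEntry (path : List Int) (out : Bool) : Prop := out = hasInvalidEntry_alt path
instance (path : List Int) (out : Bool) : Decidable (Spec_hasInvalidEntry path out) := by unfold Spec_hasInvalidEntry; infer_instance

-- ===== CLAIM (what is proved, stated in full; the proofs are below) =====
def Claim_equal_hasInvalidEntry : Prop := ∀ (path : List Int), Dom_hasInvalidEntry path → Spec_hasInvalidEntry path (hasInvalidEntry path)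

-- ===== LEMMAS AND PROOFS =====
theorem go_eq_any (n : Int) (l : List Int) :
    hasInvalidEntryGo n l = l.any (fun m => decide (m < 0) || decide (n ≤ m)) := by
  induction l with
  | nil => rfl
  | cons x t ih =>
    simp only [hasInvalidEntryGo, List.any_cons, ih]
    by_cases h1 : x < 0 <;> by_cases h2 : n ≤ x <;> simp [h1, h2]

theorem foldl_min_lt (t : List Int) (x c : Int) :
    (t.foldl min x < c) ↔ (x < c ∨ ∃ m ∈ t, m < c) := by
  induction t generalizing x with
  | nil => simp
  | cons y s ih =>
    simp only [List.foldl_cons, ih, min_lt_iff, List.mem_cons]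
    constructor
    · rintro (⟨h | h⟩ | ⟨m, hm, hc⟩)
      · exact Or.inl h
      · exact Or.inr ⟨y, Or.inl rfl, h⟩
      · exact Or.inr ⟨m, Or.inr hm, hc⟩
    · rintro (h | ⟨m, (rfl | hm), hc⟩)
      · exact Or.inl (Or.inl h)
      · exact Or.inl (Or.inr hc)
      · exact Or.inr ⟨m, hm, hc⟩

theorem foldl_max_le (t : List Int) (x c : Int) :
    (c ≤ t.foldl max x) ↔ (c ≤ x ∨ ∃ m ∈ t, c ≤ m) := by
  induction t generalizing x with
  | nil => simp
  | cons y s ih =>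
    simp only [List.foldl_cons, ih, le_max_iff, List.mem_cons]
    constructor
    · rintro (⟨h | h⟩ | ⟨m, hm, hc⟩)
      · exact Or.inl h
      · exact Or.inr ⟨y, Or.inl rfl, h⟩
      · exact Or.inr ⟨m, Or.inr hm, hc⟩
    · rintro (h | ⟨m, (rfl | hm), hc⟩)
      · exact Or.inl (Or.inl h)
      · exact Or.inl (Or.inr hc)
      · exact Or.inr ⟨m, hm, hc⟩

-- ===== VERDICT (by name: the statement is the Claim_ definition above) =====
theorem hasInvalidEntry_spec : Claim_equal_hasInvalidEntry := by
  intro path _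
  unfold Spec_hasInvalidEntry hasInvalidEntry hasInvalidEntry_alt
  cases path with
  | nil => rfl
  | cons x t =>
    simp only [List.length_cons, Nat.succ_ne_zero, if_false,
      PySem.List.min?_id_cons, PySem.List.max?_id_cons, go_eq_any]
    rw [Bool.eq_iff_iff]
    simp only [List.any_eq_true, Bool.or_eq_true, decide_eq_true_eq,
      foldl_min_lt, foldl_max_le, List.mem_cons]
    constructor
    · rintro ⟨m, (rfl | hm), (h | h)⟩
      · exact Or.inl (Or.inl h)
      · exact Or.inr (Or.inl h)
      · exact Or.inl (Or.inr ⟨m, hm, h⟩)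
      · exact Or.inr (Or.inr ⟨m, hm, h⟩)
    · rintro ((h | ⟨m, hm, h⟩) | (h | ⟨m, hm, h⟩))
      · exact ⟨x, Or.inl rfl, Or.inl h⟩
      · exact ⟨m, Or.inr hm, Or.inl h⟩
      · exact ⟨x, Or.inl rfl, Or.inr h⟩
      · exact ⟨m, Or.inr hm, Or.inr h⟩
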